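-- pv_equiv track=rewrite | github.com/jordenrsantos-sys/MTG-Deck | api/engine/deck_tune_engine_v1.py | _clean_sorted_unique_strings
-- ===== SOURCE A (Python) =====
-- from typing import Any, Dict, List, Set, Tuple
--
-- def _nonempty_str(value: Any) -> str:
--     if isinstance(value, str):
--         token = value.strip()
--         if token != "":
--             return token
--     return ""
--
-- def _clean_sorted_unique_strings(values: Any) -> List[str]:
--     if not isinstance(values, list):
--         return []
--     cleaned = {
--         token
--         for token in (_nonempty_str(value) for value in values)
--         if token != ""
--     }
--     return sorted(cleaned)
-- ===== SOURCE B (Python) =====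
-- from typing import Any, List
--
--
-- def _clean_sorted_unique_strings(values: Any) -> List[str]:
--     if not isinstance(values, list):
--         return []
--     toks = sorted(v.strip() for v in values if isinstance(v, str) and v.strip())
--     out: List[str] = []
--     for t in toks:
--         if not out or out[-1] != t:
--             out.append(t)
--     return out
-- ===== Notes on version B (the rewrite author's own statement) =====
-- stated objective: idiomatic
-- what changed: Dedup moved from a hash-set built before sorting to a single adjacent-duplicate-removal pass over the sorted cleaned list (sort first, then keep each token only when it differs from the last emitted one).
import Mathlib
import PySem

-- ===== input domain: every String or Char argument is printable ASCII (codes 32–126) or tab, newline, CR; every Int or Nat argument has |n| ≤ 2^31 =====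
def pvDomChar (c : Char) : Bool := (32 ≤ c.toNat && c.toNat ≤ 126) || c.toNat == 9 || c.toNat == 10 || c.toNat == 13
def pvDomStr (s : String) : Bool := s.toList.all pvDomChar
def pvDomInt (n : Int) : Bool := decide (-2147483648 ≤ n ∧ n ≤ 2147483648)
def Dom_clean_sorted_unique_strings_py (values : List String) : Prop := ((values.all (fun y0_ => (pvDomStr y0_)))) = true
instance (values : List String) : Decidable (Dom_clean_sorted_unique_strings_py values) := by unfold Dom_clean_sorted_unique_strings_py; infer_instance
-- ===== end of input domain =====

-- B replaces A's hash-set-then-sort dedup by sort-then-adjacent-dedup (a more idiomatic single pass over the sorted list); same values.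

-- ===== PORT A =====
-- _nonempty_str: all inputs are strings here (the List String signature), so the isinstance branch is taken.
def nonempty_str_py (value : String) : String :=
  let token := PySem.Str.strip value
  if token ≠ "" then token else ""

def clean_sorted_unique_strings_py (values : List String) : List String :=
  -- values is a list by type, so the isinstance guard never returns [].
  let cleaned := PySem.Set.ofList ((values.map (fun value => nonempty_str_py value)).filter (fun token => token ≠ ""))
  PySem.List.sorted cleaned (fun x => x) false

-- ===== PORT B =====
-- loop body: if not out or out[-1] != t: out.append(t)
def dedupAdjStep (out : List String) (t : String) : List String :=
  if out = [] ∨ PySem.List.pyGet? out (-1) ≠ some t then out ++ [t] else out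

def clean_sorted_unique_strings_py_alt (values : List String) : List String :=
  let toks := PySem.List.sorted
    ((values.filter (fun v => PySem.Str.strip v ≠ "")).map (fun v => PySem.Str.strip v)) (fun x => x) false
  toks.foldl dedupAdjStep []

-- ===== PRECONDITION & SPEC =====
def Spec_clean_sorted_unique_strings_py (values : List String) (out : List String) : Prop := out = clean_sorted_unique_strings_py_alt values
instance (values : List String) (out : List String) : Decidable (Spec_clean_sorted_unique_strings_py values out) := by unfold Spec_clean_sorted_unique_strings_py; infer_instance

-- ===== CLAIM (what is proved, stated in full; the proofs are below) =====
def Claim_equal_clean_sorted_unique_strings_py : Prop := ∀ (values : List String), Dom_clean_sorted_unique_strings_py values → Spec_clean_sorted_unique_strings_py values (clean_sorted_unique_strings_py values)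

-- ===== LEMMAS AND PROOFS =====

theorem pyGet_neg_one (a : String) (as : List String) :
    PySem.List.pyGet? (a :: as) (-1) = (a :: as).getLast? := by
  simp [PySem.List.pyGet?, PySem.List.pyIdx?, List.getLast?_eq_getElem?]

-- the two programs clean to the same token list
theorem cleaned_eq (values : List String) :
    (values.map (fun value => nonempty_str_py value)).filter (fun token => token ≠ "") =
    (values.filter (fun v => PySem.Str.strip v ≠ "")).map (fun v => PySem.Str.strip v) := by
  induction values with
  | nil => rfl
  | cons v vs ih =>
    by_cases h : PySem.Str.strip v = ""
    · have hv : nonempty_str_py v = "" := by simp [nonempty_str_py, h]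
      simp [hv, h]
      simpa using ih
    · have hv : nonempty_str_py v = PySem.Str.strip v := by simp [nonempty_str_py, h]
      simp [hv, h]
      simpa using ih

-- membership of the adjacent-dedup fold
theorem mem_dedupAdj_fold (ss : List String) :
    ∀ (acc : List String) (x : String),
      x ∈ ss.foldl dedupAdjStep acc ↔ x ∈ acc ∨ x ∈ ss := by
  induction ss with
  | nil => simp
  | cons t rest ih =>
    intro acc x
    simp only [List.foldl_cons]
    by_cases h : acc = [] ∨ PySem.List.pyGet? acc (-1) ≠ some t
    · rw [show dedupAdjStep acc t = acc ++ [t] by simp [dedupAdjStep, h]]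
      rw [ih]
      simp; tauto
    · rw [show dedupAdjStep acc t = acc by simp [dedupAdjStep, h]]
      push Not at h
      have ht : t ∈ acc := by
        have := h.2
        have hm : PySem.List.pyGet? acc (-1) = acc.getLast? := by
          cases acc with
          | nil => simp at h
          | cons a as => exact pyGet_neg_one a as
        rw [hm] at this
        exact List.mem_of_getLast? this
      rw [ih]
      simp
      constructor
      · tauto
      · rintro (h1 | h1 | h1) <;> first | exact Or.inl h1 | (subst h1; exact Or.inl ht) | exact Or.inr h1
  
-- in a strictly increasing list every element is ≤ the last
theorem le_getLast_of_pairwise_lt :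
    ∀ (acc : List String), acc.Pairwise (· < ·) →
      ∀ a ∈ acc, ∀ m, acc.getLast? = some m → a ≤ m := by
  intro acc
  induction acc with
  | nil => simp
  | cons x xs ih =>
    intro hp a ha m hm
    rcases List.pairwise_cons.mp hp with ⟨hx, hxs⟩
    cases hxs' : xs with
    | nil =>
      subst hxs'
      simp at ha hm
      simp [ha, hm]
    | cons y ys =>
      subst hxs'
      rw [List.getLast?_cons_cons] at hm
      have hmmem : m ∈ y :: ys := List.mem_of_getLast? hm
      rcases List.mem_cons.mp ha with rfl | ha'
      · exact le_of_lt (hx m hmmem)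
      · exact ih hxs a ha' m hm

-- the fold of dedupAdjStep over a ≤-sorted list is strictly increasing
theorem pairwise_dedupAdj_fold (ss : List String) :
    ∀ (acc : List String), ss.Pairwise (· ≤ ·) → acc.Pairwise (· < ·) →
      (∀ a ∈ acc, ∀ b ∈ ss, a ≤ b) →
      (ss.foldl dedupAdjStep acc).Pairwise (· < ·) := by
  induction ss with
  | nil => intro acc _ h _; simpa using h
  | cons t rest ih =>
    intro acc hs hacc hle
    rcases List.pairwise_cons.mp hs with ⟨ht, hrest⟩
    simp only [List.foldl_cons]
    by_cases h : acc = [] ∨ PySem.List.pyGet? acc (-1) ≠ some t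
    · rw [show dedupAdjStep acc t = acc ++ [t] by simp [dedupAdjStep, h]]
      apply ih (acc ++ [t]) hrest
      · rw [List.pairwise_append]
        refine ⟨hacc, by simp, ?_⟩
        intro a ha b hb
        rw [List.mem_singleton] at hb
        rw [hb]
        cases hacc' : acc with
        | nil => rw [hacc'] at ha; simp at ha
        | cons c cs =>
          rcases h with h0 | h0
          · rw [h0] at ha; simp at ha
          · rw [hacc'] at ha h0 hacc
            rw [pyGet_neg_one c cs] at h0
            obtain ⟨m, hmeq⟩ : ∃ m, (c :: cs).getLast? = some m := by
              cases hms : (c :: cs).getLast? with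
              | none => simp at hms
              | some m => exact ⟨m, rfl⟩
            have hamt : a ≤ m := le_getLast_of_pairwise_lt _ hacc a ha m hmeq
            have hmt : m ≤ t := by
              refine hle m ?_ t (by simp)
              rw [hacc']; exact List.mem_of_getLast? hmeq
            have hmne : m ≠ t := by intro hh; apply h0; rw [hmeq, hh]
            exact lt_of_le_of_lt hamt (lt_of_le_of_ne hmt hmne)
      · intro a ha b hb
        rcases List.mem_append.mp ha with ha' | ha'
        · exact hle a ha' b (by simp [hb])
        · rw [List.mem_singleton] at ha'; subst ha'; exact ht b hb
    · rw [show dedupAdjStep acc t = acc by simp [dedupAdjStep, h]]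
      exact ih acc hrest hacc (fun a ha b hb => hle a ha b (by simp [hb]))

-- ===== VERDICT (by name: the statement is the Claim_ definition above) =====
theorem clean_sorted_unique_strings_py_spec : Claim_equal_clean_sorted_unique_strings_py := by
  intro values _
  unfold Spec_clean_sorted_unique_strings_py clean_sorted_unique_strings_py clean_sorted_unique_strings_py_alt
  rw [← cleaned_eq]
  set ts := (values.map (fun value => nonempty_str_py value)).filter (fun token => token ≠ "") with hts
  set ss := PySem.List.sorted ts (fun x => x) false with hss
  set ys := ss.foldl dedupAdjStep [] with hys
  have hys_pw : ys.Pairwise (· < ·) := by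
    apply pairwise_dedupAdj_fold ss []
    · simpa using PySem.List.sorted_pairwise ts (fun x => x)
    · simp
    · simp
  apply PySem.List.sorted_eq_of_perm_of_pairwise_lt
  · rw [List.perm_ext_iff_of_nodup (hys_pw.imp (fun h => ne_of_lt h)) (PySem.Set.nodup_ofList ts)]
    intro a
    rw [mem_dedupAdj_fold, PySem.Set.mem_ofList, hss, PySem.List.mem_sorted]
    simp
  · simpa using hys_pw
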